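-- pv_equiv track=rewrite | github.com/popshia/Algorithm_Homework_1 | triangle.py | FindTriangle
-- ===== SOURCE A (Python) =====
-- def FindTriangle(num):
--     count = 0
--     for a in range(1, num + 1):
--         for b in range(a, num + 1 ):
--             for c in range(b, num + 1 ):
--                 if a != b and a != c and b !=c and a + b > c : # the three side length conforms the rule
--                     count = count + 1
--     return count
-- ===== SOURCE B (Python) =====
-- def FindTriangle(num):
--     count = 0
--     for a in range(1, num + 1):
--         for b in range(a + 1, num + 1):
--             count += max(0, min(num, a + b - 1) - b)
--     return count
-- ===== Notes on version B (the rewrite author's own statement) =====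
-- stated objective: faster
-- what changed: Replaced the innermost loop over c by the closed-form count max(0, min(num, a+b-1) - b) of valid third sides, turning O(n^3) into O(n^2).
import Mathlib
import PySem

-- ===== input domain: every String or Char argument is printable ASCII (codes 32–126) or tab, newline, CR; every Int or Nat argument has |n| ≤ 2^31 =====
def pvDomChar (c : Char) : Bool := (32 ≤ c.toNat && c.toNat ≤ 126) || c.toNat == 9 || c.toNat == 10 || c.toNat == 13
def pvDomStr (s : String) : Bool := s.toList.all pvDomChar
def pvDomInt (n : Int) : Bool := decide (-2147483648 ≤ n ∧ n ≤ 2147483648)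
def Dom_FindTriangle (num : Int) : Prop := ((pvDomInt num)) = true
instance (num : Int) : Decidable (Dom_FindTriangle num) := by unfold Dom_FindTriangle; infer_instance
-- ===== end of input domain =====

-- B replaces A's innermost loop over c by the closed-form count of valid third sides (faster).

-- ===== PORT A =====
def FindTriangle (num : Int) : Int :=
  (PySem.List.pyRange 1 (num + 1)).foldl (fun count a =>
    (PySem.List.pyRange a (num + 1)).foldl (fun count b =>
      (PySem.List.pyRange b (num + 1)).foldl (fun count c =>
        if a ≠ b ∧ a ≠ c ∧ b ≠ c ∧ a + b > c then count + 1 else count) count) count) 0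

-- ===== PORT B =====
def FindTriangle_alt (num : Int) : Int :=
  (PySem.List.pyRange 1 (num + 1)).foldl (fun count a =>
    (PySem.List.pyRange (a + 1) (num + 1)).foldl (fun count b =>
      count + max 0 (min num (a + b - 1) - b)) count) 0

-- ===== PRECONDITION & SPEC =====
def Spec_FindTriangle (num : Int) (out : Int) : Prop := out = FindTriangle_alt num
instance (num : Int) (out : Int) : Decidable (Spec_FindTriangle num out) := by unfold Spec_FindTriangle; infer_instance

-- ===== CLAIM (what is proved, stated in full; the proofs are below) =====
def Claim_equal_FindTriangle : Prop := ∀ (num : Int), Dom_FindTriangle num → Spec_FindTriangle num (FindTriangle num)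

-- ===== LEMMAS AND PROOFS =====

-- Counting an integer interval: how many c in [lo, hi) satisfy l < c < u.
theorem foldl_count_interval (l u : Int) : ∀ (n : Nat) (lo hi : Int), (hi - lo).toNat = n →
    ∀ (k : Int), (PySem.List.pyRange lo hi).foldl
      (fun acc c => if l < c ∧ c < u then acc + 1 else acc) k
      = k + max 0 (min hi u - max lo (l + 1)) := by
  intro n
  induction n with
  | zero =>
    intro lo hi h k
    have hle : hi ≤ lo := by omega
    rw [PySem.List.pyRange_one_eq_nil hle]; simp; omega
  | succ m ih =>
    intro lo hi h k
    have hlt : lo < hi := by omega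
    rw [PySem.List.pyRange_one_cons hlt]
    simp only [List.foldl_cons]
    rw [ih (lo + 1) hi (by omega)]
    by_cases hc : l < lo ∧ lo < u
    · obtain ⟨h1, h2⟩ := hc
      rw [if_pos ⟨h1, h2⟩]; omega
    · rw [if_neg hc]
      rcases not_and_or.mp hc with h1 | h1 <;> omega

-- A's inner loop over c, for fixed a < b, equals B's closed form.
theorem inner_loop_eq (num a b : Int) (hab : a < b) (k : Int) :
    (PySem.List.pyRange b (num + 1)).foldl
      (fun count c => if a ≠ b ∧ a ≠ c ∧ b ≠ c ∧ a + b > c then count + 1 else count) k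
      = k + max 0 (min num (a + b - 1) - b) := by
  rw [PySem.List.foldl_congr_mem _ _
      (fun acc c => if b < c ∧ c < a + b then acc + 1 else acc) k
      (by
        intro acc c hc
        rw [PySem.List.mem_pyRange_one] at hc
        show (if a ≠ b ∧ a ≠ c ∧ b ≠ c ∧ a + b > c then acc + 1 else acc)
          = (if b < c ∧ c < a + b then acc + 1 else acc)
        by_cases h : b < c ∧ c < a + b
        · rw [if_pos (by omega), if_pos h]
        · rw [if_neg (by omega), if_neg h])]
  rw [foldl_count_interval b (a + b) (num + 1 - b).toNat b (num + 1) rfl k]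
  omega

-- A's b-loop (starting at a) equals B's b-loop (starting at a+1): the b = a
-- iteration of A contributes nothing since the condition a ≠ b is then false.
theorem middle_loop_eq (num a : Int) (k : Int) :
    (PySem.List.pyRange a (num + 1)).foldl
      (fun count b => (PySem.List.pyRange b (num + 1)).foldl
        (fun count c => if a ≠ b ∧ a ≠ c ∧ b ≠ c ∧ a + b > c then count + 1 else count) count) k
      = (PySem.List.pyRange (a + 1) (num + 1)).foldl
        (fun count b => count + max 0 (min num (a + b - 1) - b)) k := by
  have hcongr : (PySem.List.pyRange (a + 1) (num + 1)).foldl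
      (fun count b => (PySem.List.pyRange b (num + 1)).foldl
        (fun count c => if a ≠ b ∧ a ≠ c ∧ b ≠ c ∧ a + b > c then count + 1 else count) count) k
      = (PySem.List.pyRange (a + 1) (num + 1)).foldl
        (fun count b => count + max 0 (min num (a + b - 1) - b)) k := by
    apply PySem.List.foldl_congr_mem
    intro acc b hb
    rw [PySem.List.mem_pyRange_one] at hb
    exact inner_loop_eq num a b (by omega) acc
  by_cases ha : a < num + 1
  · rw [PySem.List.pyRange_one_cons ha, List.foldl_cons]
    have hskip : (PySem.List.pyRange a (num + 1)).foldl
        (fun count c => if a ≠ a ∧ a ≠ c ∧ a ≠ c ∧ a + a > c then count + 1 else count) k = k := by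
      rw [PySem.List.foldl_congr_mem _ _ (fun acc _ => acc) k
        (by intro acc c _; simp)]
      exact List.foldl_fixed _
    rw [hskip, hcongr]
  · rw [PySem.List.pyRange_one_eq_nil (by omega : num + 1 ≤ a),
        PySem.List.pyRange_one_eq_nil (by omega : num + 1 ≤ a + 1)]
    rfl

-- ===== VERDICT (by name: the statement is the Claim_ definition above) =====
theorem FindTriangle_spec : Claim_equal_FindTriangle := by
  intro num _
  unfold Spec_FindTriangle FindTriangle FindTriangle_alt
  apply PySem.List.foldl_congr_mem
  intro acc a _
  exact middle_loop_eq num a acc
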